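-- pv_equiv track=rewrite | github.com/AyishatOguntade/Portfolio | Python Programs/Assignments/hw6_2.py | dualSort
-- ===== SOURCE A (Python) =====
-- def dualSort(list1,list2):
--     #Use this code and modify it so that it dose the work for 2 lists
--     #Then return both Lists
--     #list1 = yearList
--     #list 2 = percentList
--     #
--     for i in range(1, len(list1)):
--         year = list1[i]
--         percentfem = list2[i]
--         j = i
--         while j > 0 and percentfem > list2[j - 1] :
--             # comparison
--             list1[j] = list1[j - 1]
--             list2[j] = list2[j - 1]
--             j = j - 1
-- 	    # swap
--         list1[j] = year
--         list2[j] = percentfem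
--
--     return list1, list2
-- ===== SOURCE B (Python) =====
-- def dualSort(list1, list2):
--     pairs = sorted(zip(list1, list2), key=lambda p: p[1], reverse=True)
--     for k, (y, p) in enumerate(pairs):
--         list1[k] = y
--         list2[k] = p
--     return list1, list2
-- ===== Notes on version B (the rewrite author's own statement) =====
-- stated objective: faster
-- what changed: Replaces the hand-written dual insertion sort with one call to Python's built-in stable sort on the zipped (year, percent) pairs (key=second component, reverse=True), then writes the pairs back; O(n log n) instead of O(n^2).
import Mathlib
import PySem

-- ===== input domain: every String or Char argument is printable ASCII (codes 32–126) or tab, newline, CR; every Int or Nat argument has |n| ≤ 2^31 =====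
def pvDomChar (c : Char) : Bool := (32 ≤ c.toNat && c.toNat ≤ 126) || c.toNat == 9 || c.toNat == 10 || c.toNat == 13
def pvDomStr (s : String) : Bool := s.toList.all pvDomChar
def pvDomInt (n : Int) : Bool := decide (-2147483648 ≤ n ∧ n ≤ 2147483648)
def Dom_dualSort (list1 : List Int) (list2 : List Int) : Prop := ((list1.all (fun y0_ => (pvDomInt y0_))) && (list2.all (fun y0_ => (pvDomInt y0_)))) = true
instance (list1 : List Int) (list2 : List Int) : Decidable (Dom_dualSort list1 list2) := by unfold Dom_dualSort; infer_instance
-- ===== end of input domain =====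

-- B replaces A's hand-written parallel insertion sort by one call to Python's built-in stable
-- sort on the zipped pairs (key = percent, reverse=True): O(n log n) instead of O(n^2).
-- Both A and B mutate list1/list2 in place in Python; the equivalence proved here is about the
-- RETURN value (which aliases those lists).

-- ===== PORT A =====
-- inner `while j > 0 and percentfem > list2[j-1]` loop: state (list1, list2, j); all indices
-- touched are in range under Pre_, so getD/set are exact for Python's l[i] reads/writes.
def pvShift (percentfem : Int) : List Int → List Int → Nat → List Int × List Int × Nat
  | a, b, 0 => (a, b, 0)
  | a, b, j + 1 =>
    if percentfem > b.getD j 0 then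
      pvShift percentfem (a.set (j + 1) (a.getD j 0)) (b.set (j + 1) (b.getD j 0)) j
    else (a, b, j + 1)

-- one iteration of the outer `for i in range(1, len(list1))` loop
def pvStep (s : List Int × List Int) (i : Nat) : List Int × List Int :=
  let year := s.1.getD i 0
  let percentfem := s.2.getD i 0
  let r := pvShift percentfem s.1 s.2 i
  (r.1.set r.2.2 year, r.2.1.set r.2.2 percentfem)

def dualSort (list1 : List Int) (list2 : List Int) : List Int × List Int :=
  (List.range' 1 (list1.length - 1)).foldl pvStep (list1, list2)

-- ===== PORT B =====
-- Source B: pairs = sorted(zip(list1, list2), key=lambda p: p[1], reverse=True), then the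
-- enumerate loop writes pairs back into positions 0 .. len(pairs)-1 of each list.
def dualSort_alt (list1 : List Int) (list2 : List Int) : List Int × List Int :=
  let pairs := PySem.List.sorted (list1.zip list2) Prod.snd true
  (pairs.map Prod.fst ++ list1.drop pairs.length,
   pairs.map Prod.snd ++ list2.drop pairs.length)

-- ===== PRECONDITION & SPEC =====
-- A raises IndexError (reading list2[i]) whenever len(list2) < len(list1) ≥ 2; those inputs
-- are excluded. Every input on which A returns satisfies this Pre_.
def Pre_dualSort (list1 : List Int) (list2 : List Int) : Prop :=
  list1.length ≤ list2.length ∨ list1.length ≤ 1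
instance (list1 : List Int) (list2 : List Int) : Decidable (Pre_dualSort list1 list2) := by
  unfold Pre_dualSort; infer_instance

def pvWitness_dualSort : List Int × List Int := ([1980, 1990, 2000], [30, 50, 40])

def Spec_dualSort (list1 : List Int) (list2 : List Int) (out : List Int × List Int) : Prop := out = dualSort_alt list1 list2
instance (list1 : List Int) (list2 : List Int) (out : List Int × List Int) : Decidable (Spec_dualSort list1 list2 out) := by unfold Spec_dualSort; infer_instance

-- ===== CLAIM (what is proved, stated in full; the proofs are below) =====
def Claim_equal_dualSort : Prop := ∀ (list1 : List Int) (list2 : List Int), Dom_dualSort list1 list2 → Pre_dualSort list1 list2 → Spec_dualSort list1 list2 (dualSort list1 list2)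

-- ===== LEMMAS AND PROOFS =====

-- the `before` test of Python's stable descending sort on the snd component
def pvBef (x y : Int × Int) : Bool := decide (y.2 < x.2)

-- insertion into a list ending in y, when x must come before y, commutes with the append
theorem pvInsertBy_append_last (x y : Int × Int) (q : List (Int × Int)) (h : pvBef x y = true) :
    PySem.List.insertBy pvBef x (q ++ [y]) = PySem.List.insertBy pvBef x q ++ [y] := by
  induction q with
  | nil => simp [PySem.List.insertBy, h]
  | cons z q ih =>
    by_cases hz : pvBef x z = true <;> simp [PySem.List.insertBy, hz, ih]

-- the shift loop followed by the two writes is exactly a stable insertion into the sorted prefix p;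
-- g1/g2 is the cell at index p.length (overwritten or shifted over), t1/t2 the untouched tails.
theorem pvShift_insert (x1 x2 : Int) :
    ∀ (p : List (Int × Int)), p.Pairwise (fun u v => v.2 ≤ u.2) →
    ∀ (g1 g2 : Int) (t1 t2 : List Int),
    (let r := pvShift x2 (p.map Prod.fst ++ g1 :: t1) (p.map Prod.snd ++ g2 :: t2) p.length
     (r.1.set r.2.2 x1, r.2.1.set r.2.2 x2)) =
    ((PySem.List.insertBy pvBef (x1, x2) p).map Prod.fst ++ t1,
     (PySem.List.insertBy pvBef (x1, x2) p).map Prod.snd ++ t2) := by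
  intro p
  induction p using List.reverseRecOn with
  | nil => intro _ g1 g2 t1 t2; simp [pvShift, PySem.List.insertBy]
  | append_singleton q y ih =>
    intro hp g1 g2 t1 t2
    have hq : q.Pairwise (fun u v : Int × Int => v.2 ≤ u.2) := (List.pairwise_append.mp hp).1
    have hqy : ∀ z ∈ q, y.2 ≤ z.2 := by
      intro z hz; exact (List.pairwise_append.mp hp).2.2 z hz y (by simp)
    have hmf : (q ++ [y]).map Prod.fst ++ g1 :: t1 = q.map Prod.fst ++ y.1 :: g1 :: t1 := by simp
    have hms : (q ++ [y]).map Prod.snd ++ g2 :: t2 = q.map Prod.snd ++ y.2 :: g2 :: t2 := by simp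
    have hlen : (q ++ [y]).length = q.length + 1 := by simp
    rw [hmf, hms, hlen]
    have hb : (q.map Prod.snd ++ y.2 :: g2 :: t2).getD q.length 0 = y.2 := by
      simp [List.getD_eq_getElem?_getD]
    by_cases hc : x2 > y.2
    · -- shift y one cell to the right, continue with j = q.length
      have ha : (q.map Prod.fst ++ y.1 :: g1 :: t1).getD q.length 0 = y.1 := by
        simp [List.getD_eq_getElem?_getD]
      have hsf : (q.map Prod.fst ++ y.1 :: g1 :: t1).set (q.length + 1) y.1
          = q.map Prod.fst ++ y.1 :: y.1 :: t1 := by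
        rw [List.set_append_right _ _ (by simp)]
        simp
      have hss : (q.map Prod.snd ++ y.2 :: g2 :: t2).set (q.length + 1) y.2
          = q.map Prod.snd ++ y.2 :: y.2 :: t2 := by
        rw [List.set_append_right _ _ (by simp)]
        simp
      have hstep : pvShift x2 (q.map Prod.fst ++ y.1 :: g1 :: t1) (q.map Prod.snd ++ y.2 :: g2 :: t2) (q.length + 1)
          = pvShift x2 (q.map Prod.fst ++ y.1 :: y.1 :: t1) (q.map Prod.snd ++ y.2 :: y.2 :: t2) q.length := by
        rw [pvShift]
        simp only [hb, ha, hsf, hss, if_pos hc]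
      rw [hstep]
      have hbef : pvBef (x1, x2) y = true := by simp [pvBef]; omega
      rw [pvInsertBy_append_last _ _ _ hbef]
      have := ih hq y.1 y.2 (y.1 :: t1) (y.2 :: t2)
      simp only [this]
      simp
    · -- stop: j stays at q.length + 1, write (x1, x2) there
      have hstop : pvShift x2 (q.map Prod.fst ++ y.1 :: g1 :: t1) (q.map Prod.snd ++ y.2 :: g2 :: t2) (q.length + 1)
          = (q.map Prod.fst ++ y.1 :: g1 :: t1, q.map Prod.snd ++ y.2 :: g2 :: t2, q.length + 1) := by
        rw [pvShift]
        simp only [hb, if_neg hc]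
      rw [hstop]
      have hins : PySem.List.insertBy pvBef (x1, x2) (q ++ [y]) = (q ++ [y]) ++ [(x1, x2)] := by
        apply PySem.List.insertBy_of_forall_not_before
        intro z hz
        rcases List.mem_append.mp hz with hzq | hzy
        · have := hqy z hzq; simp [pvBef]; omega
        · simp at hzy; subst hzy; simp [pvBef]; omega
      have hsf2 : (q.map Prod.fst ++ y.1 :: g1 :: t1).set (q.length + 1) x1
          = q.map Prod.fst ++ y.1 :: x1 :: t1 := by
        rw [List.set_append_right _ _ (by simp)]
        simp
      have hss2 : (q.map Prod.snd ++ y.2 :: g2 :: t2).set (q.length + 1) x2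
          = q.map Prod.snd ++ y.2 :: x2 :: t2 := by
        rw [List.set_append_right _ _ (by simp)]
        simp
      simp only [hins, hsf2, hss2]
      simp
-- one outer iteration, phrased on the invariant shape
theorem pvStep_insert (p : List (Int × Int)) (x : Int × Int) (r1 r2 : List Int)
    (hp : p.Pairwise (fun u v => v.2 ≤ u.2)) :
    pvStep (p.map Prod.fst ++ x.1 :: r1, p.map Prod.snd ++ x.2 :: r2) p.length =
    ((PySem.List.insertBy pvBef x p).map Prod.fst ++ r1,
     (PySem.List.insertBy pvBef x p).map Prod.snd ++ r2) := by
  have h1 : (p.map Prod.fst ++ x.1 :: r1).getD p.length 0 = x.1 := by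
    simp [List.getD_eq_getElem?_getD]
  have h2 : (p.map Prod.snd ++ x.2 :: r2).getD p.length 0 = x.2 := by
    simp [List.getD_eq_getElem?_getD]
  have := pvShift_insert x.1 x.2 p hp x.1 x.2 r1 r2
  simp only [pvStep, h1, h2]
  exact this

-- the insertion fold over a prefix of the pairs
def pvIns (l : List (Int × Int)) : List (Int × Int) :=
  l.foldl (fun acc x => PySem.List.insertBy pvBef x acc) []

theorem pvIns_eq_sorted (l : List (Int × Int)) :
    pvIns l = PySem.List.sorted l Prod.snd true := by
  rw [PySem.List.sorted_rev_eq_foldl_insertBy]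
  rfl

-- the sorted prefix built by the first k outer iterations
theorem pvOuter (l1 l2 : List Int) (hlen : l1.length ≤ l2.length) :
    ∀ (k : Nat), k + 1 ≤ l1.length →
    (List.range' 1 k).foldl pvStep (l1, l2) =
      ((pvIns ((l1.zip l2).take (k + 1))).map Prod.fst ++ l1.drop (k + 1),
       (pvIns ((l1.zip l2).take (k + 1))).map Prod.snd ++ l2.drop (k + 1)) := by
  intro k
  induction k with
  | zero =>
    intro h1
    match l1, l2, hlen, h1 with
    | a :: l1', b :: l2', _, _ =>
      simp [pvIns, PySem.List.insertBy]
  | succ k ih =>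
    intro hk
    have hk1 : k + 1 ≤ l1.length := by omega
    have hzl : (l1.zip l2).length = l1.length := by
      simp; omega
    have hkz : k + 1 < (l1.zip l2).length := by omega
    have hx : (l1.zip l2)[k + 1]'hkz = (l1[k + 1]'(by omega), l2[k + 1]'(by omega)) :=
      List.getElem_zip
    have htake : (l1.zip l2).take (k + 2) = (l1.zip l2).take (k + 1) ++ [(l1[k + 1]'(by omega), l2[k + 1]'(by omega))] := by
      rw [List.take_add_one]
      simp [List.getElem?_eq_getElem hkz, hx]
    have hP : pvIns ((l1.zip l2).take (k + 2))
        = PySem.List.insertBy pvBef (l1[k + 1]'(by omega), l2[k + 1]'(by omega)) (pvIns ((l1.zip l2).take (k + 1))) := by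
      rw [htake]; simp [pvIns]
    have hPlen : (pvIns ((l1.zip l2).take (k + 1))).length = k + 1 := by
      rw [pvIns_eq_sorted, PySem.List.length_sorted, List.length_take]
      omega
    have hPsort : (pvIns ((l1.zip l2).take (k + 1))).Pairwise (fun u v : Int × Int => v.2 ≤ u.2) := by
      rw [pvIns_eq_sorted]
      exact PySem.List.sorted_pairwise_rev _ _
    have hd1 : l1.drop (k + 1) = l1[k + 1]'(by omega) :: l1.drop (k + 2) :=
      (List.getElem_cons_drop (by omega)).symm
    have hd2 : l2.drop (k + 1) = l2[k + 1]'(by omega) :: l2.drop (k + 2) :=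
      (List.getElem_cons_drop (by omega)).symm
    have hconcat : List.range' 1 (k + 1) = List.range' 1 k ++ [k + 1] := by
      rw [List.range'_concat]
      simp [Nat.add_comm]
    rw [hconcat, List.foldl_append, ih hk1]
    simp only [List.foldl_cons, List.foldl_nil]
    rw [hd1, hd2]
    have := pvStep_insert (pvIns ((l1.zip l2).take (k + 1)))
      (l1[k + 1]'(by omega), l2[k + 1]'(by omega)) (l1.drop (k + 2)) (l2.drop (k + 2)) hPsort
    rw [hPlen] at this
    rw [this, hP]

-- ===== VERDICT (by name: the statement is the Claim_ definition above) =====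
theorem dualSort_spec : Claim_equal_dualSort := by
  intro l1 l2 _ hpre
  simp only [Spec_dualSort, dualSort, dualSort_alt]
  rcases hpre with hlen | hone
  · rcases hn : l1.length with _ | m
    · -- empty list1: nothing to sort
      have : l1 = [] := List.length_eq_zero_iff.mp hn
      subst this
      simp [PySem.List.sorted]
    · -- at least one element: the full insertion loop
      have hm : m + 1 ≤ l1.length := by omega
      have h := pvOuter l1 l2 hlen m hm
      have hz : (l1.zip l2).length = l1.length := by simp; omega
      have htk : (l1.zip l2).take (m + 1) = l1.zip l2 :=
        List.take_of_length_le (by omega)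
      rw [htk] at h
      have hL : (PySem.List.sorted (l1.zip l2) Prod.snd true).length = m + 1 := by
        rw [PySem.List.length_sorted]; omega
      rw [show m + 1 - 1 = m from rfl, h, pvIns_eq_sorted, hL]
  · -- len(list1) ≤ 1: the outer loop body never runs
    match l1, hone with
    | [], _ => simp [PySem.List.sorted]
    | [a], _ =>
      match l2 with
      | [] => simp [PySem.List.sorted]
      | b :: l2' =>
        have hs : PySem.List.sorted [(a, b)] Prod.snd true = [(a, b)] :=
          PySem.List.sorted_rev_eq_self_of_pairwise _ _ (by simp)
        simp [hs]
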